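-- pv_equiv track=rewrite | github.com/jdfesa/TP4-Programacion2 | tp4-ej11.py | valida_guion_bajo_antes_de_numero
-- ===== SOURCE A (Python) =====
-- def valida_guion_bajo_antes_de_numero(contrasena: str) -> bool:
--     # Recorremos cada posición de la contraseña
--     for i in range(len(contrasena)):
--
--         # Si encontramos un guion bajo en la posición actual
--         if contrasena[i] == "_":
--
--             # Caso 1: el guion bajo está al final de la cadena
--             if i == len(contrasena) - 1:
--                 # Es válido, así que simplemente seguimos con el siguiente carácter
--                 continue  # Salta al próximo ciclo del for (no evalúa lo que sigue)
--
--             # Caso 2: el carácter siguiente NO es un número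
--             elif not contrasena[i + 1].isdigit():
--                 # No cumple la regla, por lo tanto la contraseña es inválida
--                 return False
--
--     # Si revisamos toda la contraseña y no hubo errores, entonces es válida
--     return True
-- ===== SOURCE B (Python) =====
-- def valida_guion_bajo_antes_de_numero(contrasena: str) -> bool:
--     # Split on '_': every segment after the first must start with a digit,
--     # except a trailing empty segment (underscore at the very end).
--     parts = contrasena.split('_')
--     last = len(parts) - 1
--     for k in range(1, len(parts)):
--         seg = parts[k]
--         if seg == '':
--             if k != last:
--                 return False
--         elif not seg[0].isdigit():
--             return False
--     return True
-- ===== Notes on version B (the rewrite author's own statement) =====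
-- stated objective: idiomatic
-- what changed: Replaces the index loop with lookahead (contrasena[i+1]) by splitting on '_' and checking each subsequent segment: a trailing empty segment is fine, a mid-string empty segment (consecutive underscores) is invalid, otherwise the segment must start with a digit.
import Mathlib
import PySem

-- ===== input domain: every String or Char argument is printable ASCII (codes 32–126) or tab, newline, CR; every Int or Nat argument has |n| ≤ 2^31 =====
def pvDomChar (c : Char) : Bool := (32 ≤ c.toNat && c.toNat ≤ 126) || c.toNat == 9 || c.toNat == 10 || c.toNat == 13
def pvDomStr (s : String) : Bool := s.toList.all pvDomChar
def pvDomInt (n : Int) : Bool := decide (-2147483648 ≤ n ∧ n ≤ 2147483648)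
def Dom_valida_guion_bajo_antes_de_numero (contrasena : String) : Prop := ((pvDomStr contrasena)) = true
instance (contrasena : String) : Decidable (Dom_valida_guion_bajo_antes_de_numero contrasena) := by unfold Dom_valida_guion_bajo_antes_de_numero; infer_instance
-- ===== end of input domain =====

-- B replaces A's index loop with lookahead by a split on '_' and a per-segment check (idiomatic; same cost).

-- ===== PORT A =====
-- A: for i in range(len(s)): if s[i]=='_': if i==len-1: continue; elif not s[i+1].isdigit(): return False; return True
-- (the for-loop over range(len(s)) is transliterated as structural recursion on the number of remaining iterations)
def vgA_go (s : List Char) : Nat → Nat → Bool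
  | _, 0 => true
  | i, fuel + 1 =>
    if (PySem.List.pyGet? s (i : Int)).getD ' ' = '_' then
      if i = s.length - 1 then vgA_go s (i + 1) fuel
      else if ¬ (PySem.Chars.isdigit ((PySem.List.pyGet? s ((i : Int) + 1)).getD ' ') = true) then false
      else vgA_go s (i + 1) fuel
    else vgA_go s (i + 1) fuel

def valida_guion_bajo_antes_de_numero (contrasena : String) : Bool :=
  vgA_go contrasena.toList 0 contrasena.toList.length

-- ===== PORT B =====
-- Source B's loop over parts[1:]; 'rest = []' means the current index k is the last one
def vgB_go : List (List Char) → Bool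
  | [] => true
  | seg :: rest =>
    match seg with
    | [] => if rest ≠ [] then false else vgB_go rest
    | c :: _ => if ¬ (PySem.Chars.isdigit c = true) then false else vgB_go rest

def valida_guion_bajo_antes_de_numero_alt (contrasena : String) : Bool :=
  let parts := PySem.Chars.splitOn contrasena.toList ['_']
  vgB_go parts.tail

-- ===== PRECONDITION & SPEC =====
def Spec_valida_guion_bajo_antes_de_numero (contrasena : String) (out : Bool) : Prop := out = valida_guion_bajo_antes_de_numero_alt contrasena
instance (contrasena : String) (out : Bool) : Decidable (Spec_valida_guion_bajo_antes_de_numero contrasena out) := by unfold Spec_valida_guion_bajo_antes_de_numero; infer_instance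

-- ===== CLAIM (what is proved, stated in full; the proofs are below) =====
def Claim_equal_valida_guion_bajo_antes_de_numero : Prop := ∀ (contrasena : String), Dom_valida_guion_bajo_antes_de_numero contrasena → Spec_valida_guion_bajo_antes_de_numero contrasena (valida_guion_bajo_antes_de_numero contrasena)

-- ===== LEMMAS AND PROOFS =====

-- a structural restatement of A's scan, used only by the proof
def vgScan : List Char → Bool
  | [] => true
  | c :: rest =>
    if c = '_' then
      (match rest with
       | [] => true
       | d :: _ => PySem.Chars.isdigit d && vgScan rest)
    else vgScan rest

lemma modifyHead_fun_id (L : List (List Char)) :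
    List.modifyHead (fun x => x) L = L := by cases L <;> rfl

lemma go_splitOnP (fuel : Nat) (l cur : List Char) (acc : List (List Char)) (h : l.length < fuel) :
    PySem.Chars.splitOn.go ['_'] fuel l cur acc
      = acc.reverse ++ List.modifyHead (cur.reverse ++ ·) (List.splitOnP (· == '_') l) := by
  induction fuel generalizing l cur acc with
  | zero => omega
  | succ n ih =>
    cases l with
    | nil =>
      rw [PySem.Chars.splitOn.go.eq_def]
      simp
    | cons c rest =>
      rw [PySem.Chars.splitOn.go.eq_def]
      simp only [List.splitOnP_cons, List.isPrefixOf, Bool.and_true]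
      by_cases hc : c = '_'
      · subst hc
        simp only [beq_self_eq_true, if_pos, List.length_cons, List.length_nil,
          List.drop_succ_cons, List.drop_zero]
        rw [ih rest [] _ (by simpa using h)]
        simp only [List.reverse_nil, List.nil_append, List.reverse_cons,
          List.modifyHead_cons, List.append_assoc]
        rw [modifyHead_fun_id]
        simp
      · have hbc : ('_' == c) = false := by simpa using (Ne.symm hc)
        have hbc2 : (c == '_') = false := by simpa using hc
        simp only [hbc, hbc2, Bool.false_eq_true, if_false]
        rw [ih rest (c :: cur) acc (by simpa using h), List.modifyHead_modifyHead]
        have hf : ((fun x => cur.reverse ++ x) ∘ List.cons c)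
            = (fun x : List Char => (c :: cur).reverse ++ x) := by
          funext x; simp
        rw [hf]
lemma splitOn_eq_splitOnP (s : List Char) :
    PySem.Chars.splitOn s ['_'] = List.splitOnP (· == '_') s := by
  unfold PySem.Chars.splitOn
  rw [go_splitOnP _ _ _ _ (by omega)]
  simp only [List.reverse_nil, List.nil_append]
  rw [modifyHead_fun_id]

lemma vgA_go_eq_scan (s : List Char) (fuel i : Nat) (h : fuel = s.length - i) :
    vgA_go s i fuel = vgScan (s.drop i) := by
  induction fuel generalizing i with
  | zero =>
    rw [vgA_go, List.drop_eq_nil_of_le (by omega)]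
    rfl
  | succ n ih =>
    have hx : i < s.length := by omega
    have hget : (PySem.List.pyGet? s ((i : Nat) : Int)).getD ' ' = s[i] := by
      rw [PySem.List.pyGet?_natCast]; simp [List.getElem?_eq_getElem hx]
    rw [vgA_go, hget]
    by_cases hc : s[i] = '_'
    · rw [if_pos hc]
      by_cases hlast : i = s.length - 1
      · rw [if_pos hlast, ih (i + 1) (by omega)]
        conv_rhs => rw [List.drop_eq_getElem_cons hx,
          List.drop_eq_nil_of_le (by omega : s.length ≤ i + 1)]
        rw [List.drop_eq_nil_of_le (by omega : s.length ≤ i + 1)]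
        simp [vgScan, hc]
      · rw [if_neg hlast]
        have hx1 : i + 1 < s.length := by omega
        have hget1 : (PySem.List.pyGet? s ((i : Int) + 1)).getD ' ' = s[i + 1] := by
          have hcast : ((i : Int) + 1) = ((i + 1 : Nat) : Int) := by push_cast; ring
          rw [hcast, PySem.List.pyGet?_natCast]; simp [List.getElem?_eq_getElem hx1]
        rw [hget1]
        conv_rhs => rw [List.drop_eq_getElem_cons hx, List.drop_eq_getElem_cons hx1]
        by_cases hd : PySem.Chars.isdigit (s[i + 1]'hx1) = true
        · rw [if_neg (by simp [hd]), ih (i + 1) (by omega), List.drop_eq_getElem_cons hx1]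
          simp [vgScan, hc, hd]
        · rw [if_pos hd]
          simp [vgScan, hc, Bool.eq_false_iff.mpr hd]
    · rw [if_neg hc, ih (i + 1) (by omega)]
      conv_rhs => rw [List.drop_eq_getElem_cons hx]
      simp [vgScan, hc]

lemma scan_eq_vgB (s : List Char) : vgScan s = vgB_go (List.splitOnP (· == '_') s).tail := by
  induction s with
  | nil => simp [vgScan, List.splitOnP_nil, vgB_go]
  | cons c rest ih =>
    by_cases hc : c = '_'
    · subst hc
      rw [List.splitOnP_cons]
      simp only [beq_self_eq_true, if_pos, List.tail_cons]
      cases rest with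
      | nil => simp [vgScan, List.splitOnP_nil, vgB_go]
      | cons d r =>
        have l1 : vgScan ('_' :: d :: r) = (PySem.Chars.isdigit d && vgScan (d :: r)) := by
          simp [vgScan]
        by_cases hd : d = '_'
        · subst hd
          have hne := List.splitOnP_ne_nil (· == '_') r
          rw [l1, List.splitOnP_cons]
          simp [vgB_go, hne, PySem.Chars.isdigit]
        · have hbd : (d == '_') = false := by simpa using hd
          cases e : List.splitOnP (· == '_') r with
          | nil => exact absurd e (List.splitOnP_ne_nil _ _)
          | cons h t =>
            rw [List.splitOnP_cons, hbd] at ih ⊢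
            simp only [Bool.false_eq_true, if_false, e, List.modifyHead_cons,
              List.tail_cons] at ih ⊢
            rw [l1, ih]
            cases hdig : PySem.Chars.isdigit d <;> simp [vgB_go, hdig]
    · have hbc : (c == '_') = false := by simpa using hc
      have l2 : vgScan (c :: rest) = vgScan rest := by simp [vgScan, hc]
      rw [l2, List.splitOnP_cons, hbc]
      simp only [Bool.false_eq_true, if_false, List.tail_modifyHead]
      exact ih

-- ===== VERDICT (by name: the statement is the Claim_ definition above) =====
theorem valida_guion_bajo_antes_de_numero_spec : Claim_equal_valida_guion_bajo_antes_de_numero := by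
  intro s _
  unfold Spec_valida_guion_bajo_antes_de_numero valida_guion_bajo_antes_de_numero valida_guion_bajo_antes_de_numero_alt
  rw [vgA_go_eq_scan _ _ _ (by omega), splitOn_eq_splitOnP, List.drop_zero, scan_eq_vgB]
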